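-- pv_equiv track=rewrite | github.com/the-vampiire/sqlit | sqlit/app.py | _offset_to_location
-- ===== SOURCE A (Python) =====
-- def _offset_to_location(text: str, offset: int) -> tuple:
--     """Convert text offset to (row, col) location."""
--     lines = text.split("\n")
--     current_offset = 0
--     for row, line in enumerate(lines):
--         if current_offset + len(line) >= offset:
--             return (row, offset - current_offset)
--         current_offset += len(line) + 1
--     return (len(lines) - 1, len(lines[-1]) if lines else 0)
-- ===== SOURCE B (Python) =====
-- def _offset_to_location(text: str, offset: int) -> tuple:
--     """Convert text offset to (row, col) location."""
--     pos = max(0, min(offset, len(text)))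
--     head = text[:pos]
--     row = head.count("\n")
--     line_start = head.rfind("\n") + 1
--     return (row, pos - line_start)
-- ===== Notes on version B (the rewrite author's own statement) =====
-- stated objective: simpler
-- what changed: A splits the text into a list of lines and scans it with a running offset plus a fallback return; B builds no line list: it clamps the offset into [0, len(text)] and reads the row/column directly off the prefix with str.count and str.rfind.
-- intended difference: For negative offsets A returns (0, offset), a negative column that is meaningless as a text location; B clamps the offset to the start of the text and returns (0, 0), the intended location. — e.g. on _offset_to_location("", -1): A returns (0, -1), B returns (0, 0)
import Mathlib
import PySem

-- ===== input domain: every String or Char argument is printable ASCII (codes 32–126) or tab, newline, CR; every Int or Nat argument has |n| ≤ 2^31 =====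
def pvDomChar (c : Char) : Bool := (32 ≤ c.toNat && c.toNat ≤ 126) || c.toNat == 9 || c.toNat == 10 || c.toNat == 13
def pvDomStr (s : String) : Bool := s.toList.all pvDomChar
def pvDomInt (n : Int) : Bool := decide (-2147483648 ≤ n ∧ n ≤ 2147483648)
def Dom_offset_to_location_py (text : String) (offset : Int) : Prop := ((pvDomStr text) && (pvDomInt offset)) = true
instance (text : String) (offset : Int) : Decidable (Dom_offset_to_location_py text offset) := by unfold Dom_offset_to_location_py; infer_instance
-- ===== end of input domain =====

-- B builds no line list: it clamps the offset into [0, len(text)] and reads row/column off the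
-- clamped prefix with count/rfind; on negative offsets A returns a negative column and B returns
-- (0, 0), stated as the intended difference D_ below.

-- ===== PORT A =====
-- the 'for row, line in enumerate(lines)' loop with early return; none = loop fell through
def aGo : List (List Char) → Int → Int → Int → Option (Int × Int)
  | [], _, _, _ => none
  | line :: rest, row, cur, off =>
    if cur + (line.length : Int) ≥ off then some (row, off - cur)
    else aGo rest (row + 1) (cur + (line.length : Int) + 1) off

-- loop plus the fallback return '(len(lines) - 1, len(lines[-1]) if lines else 0)'
def aResult (lines : List (List Char)) (off : Int) : Int × Int :=
  match aGo lines 0 0 off with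
  | some rc => rc
  | none =>
    ((lines.length : Int) - 1,
      if lines = [] then 0
      else (((PySem.List.pyGet? lines (-1)).getD []).length : Int))

def offset_to_location_py (text : String) (offset : Int) : Int × Int :=
  aResult (PySem.Chars.splitOn text.toList "\n".toList) offset

-- ===== PORT B =====
-- hand port of head.count("\n") (exact: counts occurrences of the one-char substring)
def bCount : List Char → Int
  | [] => 0
  | c :: cs => (if c = '\n' then 1 else 0) + bCount cs

-- hand port of head.rfind("\n") (exact: index of the last '\n', -1 if none)
def bRfind : List Char → Int
  | [] => -1
  | c :: cs =>
    let r := bRfind cs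
    if r = -1 then (if c = '\n' then 0 else -1) else r + 1

def offset_to_location_py_alt (text : String) (offset : Int) : Int × Int :=
  let n : Int := (text.toList.length : Int)
  let pos := max 0 (min offset n)
  let head := PySem.List.slice text.toList none (some pos)
  (bCount head, pos - (bRfind head + 1))

-- ===== PRECONDITION & SPEC =====
-- For negative offsets A returns (0, offset), a negative column that is meaningless as a text
-- location; B clamps the offset to the start of the text and returns (0, 0), the intended location.
def D_offset_to_location_py (text : String) (offset : Int) : Prop := offset < 0
instance (text : String) (offset : Int) : Decidable (D_offset_to_location_py text offset) := by unfold D_offset_to_location_py; infer_instance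

def Spec_offset_to_location_py (text : String) (offset : Int) (out : Int × Int) : Prop :=
  ¬ D_offset_to_location_py text offset → out = offset_to_location_py_alt text offset
instance (text : String) (offset : Int) (out : Int × Int) : Decidable (Spec_offset_to_location_py text offset out) := by unfold Spec_offset_to_location_py; infer_instance

def pvDiffWitness_offset_to_location_py : String × Int := ("", -1)
def pvDiffWitnessOut_offset_to_location_py : (Int × Int) × (Int × Int) := ((0, -1), (0, 0))

-- ===== CLAIM (what is proved, stated in full; the proofs are below) =====
def Claim_unchanged_offset_to_location_py : Prop := ∀ (text : String) (offset : Int), Dom_offset_to_location_py text offset → Spec_offset_to_location_py text offset (offset_to_location_py text offset)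
def Claim_changed_offset_to_location_py : Prop := Dom_offset_to_location_py (pvDiffWitness_offset_to_location_py.1) (pvDiffWitness_offset_to_location_py.2) ∧ D_offset_to_location_py (pvDiffWitness_offset_to_location_py.1) (pvDiffWitness_offset_to_location_py.2) ∧ offset_to_location_py (pvDiffWitness_offset_to_location_py.1) (pvDiffWitness_offset_to_location_py.2) = pvDiffWitnessOut_offset_to_location_py.1 ∧ offset_to_location_py_alt (pvDiffWitness_offset_to_location_py.1) (pvDiffWitness_offset_to_location_py.2) = pvDiffWitnessOut_offset_to_location_py.2 ∧ pvDiffWitnessOut_offset_to_location_py.1 ≠ pvDiffWitnessOut_offset_to_location_py.2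
def Claim_exact_offset_to_location_py : Prop := ∀ (text : String) (offset : Int), Dom_offset_to_location_py text offset → D_offset_to_location_py text offset → offset_to_location_py text offset ≠ offset_to_location_py_alt text offset

-- ===== LEMMAS AND PROOFS =====

-- proof-side reference loop: one step per character of the prefix
def bStep (rc : Int × Int) (c : Char) : Int × Int :=
  if c = '\n' then (rc.1 + 1, 0) else (rc.1, rc.2 + 1)

-- a structural-recursion description of text.split("\n")
def splitOnSimple : List Char → List (List Char)
  | [] => [[]]
  | c :: cs => if c = '\n' then [] :: splitOnSimple cs else (splitOnSimple cs).modifyHead (c :: ·)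

lemma splitOnSimple_ne_nil (cs : List Char) : splitOnSimple cs ≠ [] := by
  induction cs with
  | nil => simp [splitOnSimple]
  | cons c cs ih =>
    simp only [splitOnSimple]
    split_ifs
    · simp
    · cases h : splitOnSimple cs with
      | nil => exact absurd h ih
      | cons a l => simp

lemma go_nil (sep fuel cur acc) : PySem.Chars.splitOn.go sep (fuel+1) [] cur acc = (cur.reverse :: acc).reverse := by
  simp [PySem.Chars.splitOn.go]

lemma go_cons (sep fuel c rest cur acc) : PySem.Chars.splitOn.go sep (fuel+1) (c::rest) cur acc =
    if sep.isPrefixOf (c::rest) then PySem.Chars.splitOn.go sep fuel (List.drop sep.length (c::rest)) [] (cur.reverse :: acc)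
    else PySem.Chars.splitOn.go sep fuel rest (c :: cur) acc := by
  simp [PySem.Chars.splitOn.go]

lemma go_eq_simple : ∀ (fuel : Nat) (l cur : List Char) (acc : List (List Char)), l.length < fuel →
    PySem.Chars.splitOn.go ['\n'] fuel l cur acc
      = acc.reverse ++ (splitOnSimple l).modifyHead (cur.reverse ++ ·) := by
  intro fuel
  induction fuel with
  | zero => intro l cur acc h; omega
  | succ fuel ih =>
    intro l cur acc h
    cases l with
    | nil => simp [go_nil, splitOnSimple, List.modifyHead]
    | cons c rest =>
      rw [go_cons]
      by_cases hc : c = '\n'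
      · subst hc
        have hp : List.isPrefixOf ['\n'] ('\n' :: rest) = true := by simp [List.isPrefixOf]
        rw [if_pos hp]
        simp only [List.length_cons] at h
        rw [ih _ _ _ (by simpa using Nat.lt_of_succ_lt_succ h)]
        simp [splitOnSimple, List.modifyHead]
        cases hs : splitOnSimple rest with
        | nil => exact absurd hs (splitOnSimple_ne_nil rest)
        | cons a l' => simp
      · have hp : List.isPrefixOf ['\n'] (c :: rest) = false := by
          simp [List.isPrefixOf]; exact fun hh => hc hh.symm
        rw [if_neg (by simp [hp])]
        simp only [List.length_cons] at h
        rw [ih _ _ _ (by omega)]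
        simp only [splitOnSimple, if_neg hc]
        cases hs : splitOnSimple rest with
        | nil => exact absurd hs (splitOnSimple_ne_nil rest)
        | cons a l' => simp [List.modifyHead]

lemma splitOn_eq_simple (cs : List Char) : PySem.Chars.splitOn cs ['\n'] = splitOnSimple cs := by
  unfold PySem.Chars.splitOn
  rw [go_eq_simple (cs.length + 1) cs [] [] (by omega)]
  cases hs : splitOnSimple cs with
  | nil => exact absurd hs (splitOnSimple_ne_nil cs)
  | cons a l' => simp [List.modifyHead]

lemma aGo_shift : ∀ (lines : List (List Char)) (row cur off : Int),
    aGo lines row cur off = (aGo lines 0 0 (off - cur)).map (fun p => (p.1 + row, p.2)) := by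
  intro lines
  induction lines with
  | nil => intro row cur off; simp [aGo]
  | cons line rest ih =>
    intro row cur off
    simp only [aGo, zero_add]
    by_cases hc : cur + (line.length : Int) ≥ off
    · rw [if_pos hc, if_pos (by omega)]
      simp
    · rw [if_neg hc, if_neg (by omega)]
      rw [ih (row + 1) (cur + (line.length : Int) + 1) off,
          ih 1 ((line.length : Int) + 1) (off - cur)]
      have harg : off - (cur + (line.length : Int) + 1) = off - cur - ((line.length : Int) + 1) := by omega
      rw [harg, Option.map_map]
      congr 1
      funext p
      simp only [Function.comp]
      simp only [Prod.mk.injEq, and_true]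
      ring

lemma bfold_fst_mono : ∀ (l : List Char) (r c : Int), r ≤ (l.foldl bStep (r, c)).1 := by
  intro l
  induction l with
  | nil => intro r c; simp
  | cons ch l ih =>
    intro r c
    simp only [List.foldl_cons, bStep]
    by_cases hc : ch = '\n'
    · rw [if_pos hc]; exact le_trans (by omega) (ih (r + 1) 0)
    · rw [if_neg hc]; exact ih r (c + 1)

lemma bfold_shift : ∀ (l : List Char) (r c : Int),
    l.foldl bStep (r, c) =
      ((l.foldl bStep ((0:Int), (0:Int))).1 + r,
       if (l.foldl bStep ((0:Int), (0:Int))).1 = 0 then c + (l.foldl bStep ((0:Int), (0:Int))).2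
       else (l.foldl bStep ((0:Int), (0:Int))).2) := by
  intro l
  induction l with
  | nil => intro r c; simp
  | cons ch l ih =>
    intro r c
    simp only [List.foldl_cons, bStep]
    by_cases hc : ch = '\n'
    · rw [if_pos hc, if_pos hc]
      rw [ih (r + 1) 0]
      simp only [zero_add]
      rw [ih 1 0]
      have h0 : (0:Int) ≤ (l.foldl bStep ((0:Int), (0:Int))).1 := bfold_fst_mono l 0 0
      clear ih
      simp only [Prod.mk.injEq]
      split_ifs <;> constructor <;> omega
    · rw [if_neg hc, if_neg hc]
      rw [ih r (c + 1)]
      simp only [zero_add]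
      rw [ih 0 1]
      have h0 : (0:Int) ≤ (l.foldl bStep ((0:Int), (0:Int))).1 := bfold_fst_mono l 0 0
      clear ih
      simp only [Prod.mk.injEq]
      split_ifs <;> constructor <;> omega

lemma pyGet_neg_one {α : Type} (l : List α) : PySem.List.pyGet? l (-1) = l.getLast? := by
  simp [PySem.List.pyGet?, PySem.List.pyIdx?]
  cases l with
  | nil => simp
  | cons a t => simp [List.getLast?_eq_getElem?]

lemma aGo_row_le : ∀ (lines : List (List Char)) (row cur off : Int) (p : Int × Int),
    aGo lines row cur off = some p → row ≤ p.1 := by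
  intro lines
  induction lines with
  | nil => intro row cur off p h; simp [aGo] at h
  | cons line rest ih =>
    intro row cur off p h
    simp only [aGo] at h
    by_cases hc : cur + (line.length : Int) ≥ off
    · rw [if_pos hc] at h
      cases h
      simp
    · rw [if_neg hc] at h
      exact le_trans (by omega) (ih _ _ _ _ h)

lemma A_le (cs : List Char) (off : Int) (h : off ≤ 0) : aResult (splitOnSimple cs) off = (0, off) := by
  cases hs : splitOnSimple cs with
  | nil => exact absurd hs (splitOnSimple_ne_nil cs)
  | cons l ls =>
    have hcond : (0:Int) + (l.length : Int) ≥ off := by omega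
    simp only [aResult, aGo, if_pos hcond]
    simp

lemma A_newline (cs : List Char) (off : Int) (h : 0 < off) :
    aResult (splitOnSimple ('\n'::cs)) off =
      ((aResult (splitOnSimple cs) (off-1)).1 + 1, (aResult (splitOnSimple cs) (off-1)).2) := by
  have hsplit : splitOnSimple ('\n'::cs) = [] :: splitOnSimple cs := by simp [splitOnSimple]
  rw [hsplit]
  cases hS : splitOnSimple cs with
  | nil => exact absurd hS (splitOnSimple_ne_nil cs)
  | cons hd tl =>
    have step : aGo ([] :: (hd :: tl)) 0 0 off = aGo (hd :: tl) 1 1 off := by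
      simp only [aGo]
      rw [if_neg (by simp; omega)]
      norm_num
    have hshift := aGo_shift (hd :: tl) 1 1 off
    simp only [aResult, step, hshift]
    cases hgo : aGo (hd :: tl) 0 0 (off - 1) with
    | some p => simp
    | none =>
      simp only [Option.map_none]
      simp [pyGet_neg_one, List.getLast?_cons_cons]

lemma A_char (c : Char) (cs : List Char) (off : Int) (hc : c ≠ '\n') (_h : 0 < off) :
    aResult (splitOnSimple (c::cs)) off =
      ((aResult (splitOnSimple cs) (off-1)).1,
       if (aResult (splitOnSimple cs) (off-1)).1 = 0 then (aResult (splitOnSimple cs) (off-1)).2 + 1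
       else (aResult (splitOnSimple cs) (off-1)).2) := by
  cases hS : splitOnSimple cs with
  | nil => exact absurd hS (splitOnSimple_ne_nil cs)
  | cons hd tl =>
    have hsplit : splitOnSimple (c::cs) = (c :: hd) :: tl := by
      simp only [splitOnSimple, if_neg hc, hS, List.modifyHead]
    rw [hsplit]
    by_cases hcond : (hd.length : Int) + 1 ≥ off
    · simp only [aResult, aGo]
      rw [if_pos (show (0:Int) + ((c :: hd).length : Int) ≥ off by simp only [List.length_cons]; push_cast; omega),
          if_pos (show (0:Int) + (hd.length : Int) ≥ off - 1 by omega)]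
      simp
    · simp only [aResult, aGo]
      rw [if_neg (show ¬ ((0:Int) + ((c :: hd).length : Int) ≥ off) by simp only [List.length_cons]; push_cast; omega),
          if_neg (show ¬ ((0:Int) + (hd.length : Int) ≥ off - 1) by omega)]
      rw [aGo_shift tl (0+1) (0 + ((c :: hd).length : Int) + 1) off,
          aGo_shift tl (0+1) (0 + (hd.length : Int) + 1) (off - 1)]
      have harg : off - (0 + ((c :: hd).length : Int) + 1) = off - 1 - (0 + (hd.length : Int) + 1) := by
        simp only [List.length_cons]
        push_cast
        ring
      rw [harg]
      cases hgo : aGo tl 0 0 (off - 1 - (0 + (hd.length : Int) + 1)) with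
      | some p =>
        have hrow : 0 ≤ p.1 := aGo_row_le tl 0 0 _ p hgo
        simp only [Option.map_some]
        rw [if_neg (by omega)]
      | none =>
        simp only [Option.map_none]
        cases tl with
        | nil =>
          simp [pyGet_neg_one]
        | cons t ts =>
          simp [pyGet_neg_one, List.getLast?_cons_cons]
          omega

lemma B_newline (cs : List Char) (off : Int) (h : 0 < off) :
    (('\n'::cs).take off.toNat).foldl bStep (0, 0) =
      (((cs.take (off-1).toNat).foldl bStep (0, 0)).1 + 1, ((cs.take (off-1).toNat).foldl bStep (0, 0)).2) := by
  have ht : off.toNat = (off - 1).toNat + 1 := by omega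
  rw [ht, List.take_succ_cons, List.foldl_cons]
  have hb : bStep (0, 0) '\n' = ((1:Int), (0:Int)) := by simp [bStep]
  rw [hb, bfold_shift]
  split_ifs <;> simp

lemma B_char (c : Char) (cs : List Char) (off : Int) (hc : c ≠ '\n') (h : 0 < off) :
    ((c::cs).take off.toNat).foldl bStep (0, 0) =
      (((cs.take (off-1).toNat).foldl bStep (0, 0)).1,
       if ((cs.take (off-1).toNat).foldl bStep (0, 0)).1 = 0 then ((cs.take (off-1).toNat).foldl bStep (0, 0)).2 + 1
       else ((cs.take (off-1).toNat).foldl bStep (0, 0)).2) := by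
  have ht : off.toNat = (off - 1).toNat + 1 := by omega
  rw [ht, List.take_succ_cons, List.foldl_cons]
  have hb : bStep (0, 0) c = ((0:Int), (1:Int)) := by simp [bStep, hc]
  rw [hb, bfold_shift]
  split_ifs
  all_goals simp
  all_goals omega

-- A's result equals the reference character loop over the prefix (or (0, off) for off < 0)
lemma main_eq : ∀ (cs : List Char) (off : Int),
    aResult (splitOnSimple cs) off
      = if off < 0 then (0, off) else (cs.take off.toNat).foldl bStep (0, 0) := by
  intro cs
  induction cs with
  | nil =>
    intro off
    rcases lt_trichotomy off 0 with h | h | h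
    · rw [if_pos h, A_le _ _ (le_of_lt h)]
    · subst h
      rw [if_neg (lt_irrefl 0), A_le _ _ le_rfl]
      simp
    · rw [if_neg (by omega)]
      simp only [splitOnSimple, aResult, aGo]
      rw [if_neg (by simp; omega)]
      simp [pyGet_neg_one]
  | cons c cs ih =>
    intro off
    by_cases h0 : off ≤ 0
    · rw [A_le _ _ h0]
      rcases eq_or_lt_of_le h0 with he | hl
      · subst he
        simp
      · rw [if_pos hl]
    · rw [not_le] at h0
      rw [if_neg (by omega)]
      by_cases hc : c = '\n'
      · subst hc
        rw [A_newline cs off h0, B_newline cs off h0, ih (off - 1), if_neg (by omega)]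
      · rw [A_char c cs off hc h0, B_char c cs off hc h0, ih (off - 1), if_neg (by omega)]

-- the reference loop computes exactly B's count/rfind description
lemma bRfind_ge : ∀ (l : List Char), -1 ≤ bRfind l := by
  intro l
  induction l with
  | nil => simp [bRfind]
  | cons c cs ih => simp only [bRfind]; split_ifs <;> omega
lemma fold_count_rfind : ∀ (l : List Char) (r c : Int),
    l.foldl bStep (r, c)
      = (r + bCount l,
         if bRfind l = -1 then c + (l.length : Int) else (l.length : Int) - (bRfind l + 1)) := by
  intro l
  induction l with
  | nil => intro r c; simp [bCount, bRfind]
  | cons ch l ih =>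
    intro r c
    have hge := bRfind_ge l
    rw [List.foldl_cons]
    by_cases hc : ch = '\n'
    · rw [show bStep (r, c) ch = (r + 1, 0) by simp [bStep, hc], ih]
      have h1 : bCount (ch :: l) = 1 + bCount l := by simp [bCount, hc]
      by_cases hr : bRfind l = -1
      · have h2 : bRfind (ch :: l) = 0 := by simp [bRfind, hc, hr]
        rw [h1, h2, List.length_cons, if_pos hr, if_neg (by omega)]
        simp only [Prod.mk.injEq]
        constructor <;> (push_cast; omega)
      · have h2 : bRfind (ch :: l) = bRfind l + 1 := by simp [bRfind, hc, hr]
        rw [h1, h2, List.length_cons, if_neg hr, if_neg (by omega)]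
        simp only [Prod.mk.injEq]
        constructor <;> (push_cast; omega)
    · rw [show bStep (r, c) ch = (r, c + 1) by simp [bStep, hc], ih]
      have h1 : bCount (ch :: l) = 0 + bCount l := by simp [bCount, hc]
      by_cases hr : bRfind l = -1
      · have h2 : bRfind (ch :: l) = -1 := by simp [bRfind, hc, hr]
        rw [h1, h2, List.length_cons, if_pos hr, if_pos rfl]
        simp only [Prod.mk.injEq]
        constructor <;> (push_cast; omega)
      · have h2 : bRfind (ch :: l) = bRfind l + 1 := by simp [bRfind, hc, hr]
        rw [h1, h2, List.length_cons, if_neg hr, if_neg (by omega)]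
        simp only [Prod.mk.injEq]
        constructor <;> (push_cast; omega)

lemma B_alt_eq_core (cs : List Char) (off : Int) (h : 0 ≤ off) :
    (bCount (PySem.List.slice cs none (some (max 0 (min off ((cs.length : Nat) : Int))))),
      max 0 (min off ((cs.length : Nat) : Int)) -
        (bRfind (PySem.List.slice cs none (some (max 0 (min off ((cs.length : Nat) : Int))))) + 1))
      = (cs.take off.toNat).foldl bStep (0, 0) := by
  set pos : Int := max 0 (min off ((cs.length : Nat) : Int)) with hpos
  have hpos0 : 0 ≤ pos := le_max_left _ _
  have hposn : pos ≤ (cs.length : Int) := max_le (by positivity) (min_le_right _ _)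
  have hslice : PySem.List.slice cs none (some pos) = cs.take pos.toNat := by
    rw [show (some pos) = some ((pos.toNat : Nat) : Int) by rw [Int.toNat_of_nonneg hpos0],
        PySem.List.slice_to_natCast]
  have htake : cs.take pos.toNat = cs.take off.toNat := by
    by_cases hle : off ≤ (cs.length : Int)
    · have : pos = off := by rw [hpos, min_eq_left hle, max_eq_right h]
      rw [this]
    · push_neg at hle
      have hp : pos = (cs.length : Int) := by
        rw [hpos, min_eq_right hle.le, max_eq_right (by positivity)]
      rw [hp]
      rw [List.take_of_length_le (by omega), List.take_of_length_le (by omega)]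
  have hlen : (((cs.take off.toNat).length : Nat) : Int) = pos := by
    rw [← htake, List.length_take]
    omega
  rw [hslice, htake, fold_count_rfind, hlen]
  by_cases hr : bRfind (cs.take off.toNat) = -1
  · rw [if_pos hr, hr]
    simp only [Prod.mk.injEq]
    refine ⟨by omega, by omega⟩
  · rw [if_neg hr]
    simp only [Prod.mk.injEq, zero_add, and_true, true_and]
    try omega
    try trivial

-- B equals the reference loop over the (clamped) prefix, for non-negative offsets
lemma B_alt_eq (text : String) (off : Int) (h : 0 ≤ off) :
    offset_to_location_py_alt text off = (text.toList.take off.toNat).foldl bStep (0, 0) :=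
  B_alt_eq_core text.toList off h

-- for a negative offset B's clamp lands at the start of the text
lemma B_alt_neg (text : String) (off : Int) (h : off < 0) :
    offset_to_location_py_alt text off = (0, 0) := by
  show (bCount (PySem.List.slice text.toList none (some (max 0 (min off ((text.toList.length : Nat) : Int))))),
        max 0 (min off ((text.toList.length : Nat) : Int)) -
          (bRfind (PySem.List.slice text.toList none (some (max 0 (min off ((text.toList.length : Nat) : Int))))) + 1))
      = (0, 0)
  have hp : max 0 (min off ((text.toList.length : Nat) : Int)) = 0 :=
    max_eq_left (le_trans (min_le_left _ _) (by omega))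
  rw [hp]
  have hs0 : PySem.List.slice text.toList none (some ((((0:Nat)):Nat) : Int)) = text.toList.take (0:Nat) :=
    PySem.List.slice_to_natCast text.toList 0
  rw [show ((0:Int)) = (((0:Nat)) : Int) from rfl, hs0]
  simp [bCount, bRfind]

-- ===== VERDICT (by name: the statements are the Claim_ definitions above) =====
theorem offset_to_location_py_spec : Claim_unchanged_offset_to_location_py := by
  intro text offset _ hnd
  unfold D_offset_to_location_py at hnd
  have h0 : 0 ≤ offset := by omega
  unfold offset_to_location_py
  have h1 : "\n".toList = ['\n'] := rfl
  rw [h1, splitOn_eq_simple, main_eq, if_neg (by omega), ← B_alt_eq text offset h0]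

theorem offset_to_location_py_changed : Claim_changed_offset_to_location_py := by
  unfold Claim_changed_offset_to_location_py
  decide

theorem offset_to_location_py_tight : Claim_exact_offset_to_location_py := by
  intro text offset _ hd
  unfold D_offset_to_location_py at hd
  have hA : offset_to_location_py text offset = (0, offset) := by
    unfold offset_to_location_py
    have h1 : "\n".toList = ['\n'] := rfl
    rw [h1, splitOn_eq_simple, main_eq, if_pos hd]
  rw [hA, B_alt_neg text offset hd]
  intro heq
  have h2 := congrArg Prod.snd heq
  simp at h2
  omega
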